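-- pv_equiv track=rewrite | github.com/davidsaltacc/cgsearch | search/stats/link_warnings.py | information_filehost
-- ===== SOURCE A (Python) =====
-- from enum import Enum
--
-- class NotRecommendedFilehost(Enum): # more can be added, there are just some more used ones
--     DDownload = 1 # slow without premium
--     RapidGator = 2 # slow without premium
--     NitroFlare = 3 # slow without premium
--     FikPer = 4 # slow without premium
--     OneFichier = 5 # annoying limitations
--     Qiwi = 6 # with their migration to ranoz.gg, qiwi links don't work
--     ZippyShare = 7 # shut down
--     PixelDrain = 8 # is good in terms of speed, has a download limit though - can be bypassed
--
-- def information_filehost(items):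
--
--     filehost = None
--
--     for item in items:
--         if "ddownload" in item.lower():
--             filehost = NotRecommendedFilehost.DDownload
--         if "rapidgator" in item.lower():
--             filehost = NotRecommendedFilehost.RapidGator
--         if "nitroflare" in item.lower():
--             filehost = NotRecommendedFilehost.NitroFlare
--         if "fikper" in item.lower():
--             filehost = NotRecommendedFilehost.FikPer
--         if "1fichier" in item.lower():
--             filehost = NotRecommendedFilehost.OneFichier
--         if "qiwi" in item.lower():
--             filehost = NotRecommendedFilehost.Qiwi
--         if "zippyshare" in item.lower():
--             filehost = NotRecommendedFilehost.ZippyShare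
--         if "pixeldrain" in item.lower():
--             filehost = NotRecommendedFilehost.PixelDrain
--
--     if filehost:
--         if filehost == NotRecommendedFilehost.DDownload:
--             return "Warning: A DDownload link was detected. Their downloads are extemely slow without their premium plan, you might want to choose a different link if available."
--         if filehost == NotRecommendedFilehost.RapidGator:
--             return "Warning: A RapidGator link was detected. Their downloads are extemely slow without their premium plan, you might want to choose a different link if available."
--         if filehost == NotRecommendedFilehost.NitroFlare:
--             return "Warning: A NitroFlare link was detected. Their downloads are extemely slow without their premium plan, you might want to choose a different link if available."
--         if filehost == NotRecommendedFilehost.FikPer: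
--             return "Warning: A FikPer link was detected. Their downloads are extemely slow without their premium plan, you might want to choose a different link if available."
--         if filehost == NotRecommendedFilehost.OneFichier:
--             return "Warning: A 1Fichier link was detected. Their download speed isn't extremely slow, but the site has several limitations on their free plan. For example, if you try to access a file a second time, you will have to wait out a very long countdown. You might want to choose a different link if available."
--         if filehost == NotRecommendedFilehost.Qiwi:
--             return "Warning: A Qiwi link was detected. They used to be a good filehost, but with their migration to ranoz.gg all qiwi.gg links got invalidated. This may be subject to change in the future, but for now you might want to choose a different link if available."
--         if filehost == NotRecommendedFilehost.ZippyShare: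
--             return "Warning: A ZippyShare link was detected. ZippyShare got taken down, you should probably choose a different link."
--         if filehost == NotRecommendedFilehost.PixelDrain:
--             return "Warning: A PixelDrain link was detected. Pixeldrain may be good in terms of download speed, but there is a limit on how much you can download. This can be bypassed though, for example with userscripts such as MegaLime0/pixeldrain-bypass-usercript on github."
--     else:
--         return None
-- ===== SOURCE B (Python) =====
-- _MSG_SLOW = ("Warning: A {} link was detected. Their downloads are extemely slow without "
--              "their premium plan, you might want to choose a different link if available.")
--
-- _TABLE = [
--     ("ddownload", _MSG_SLOW.format("DDownload")),
--     ("rapidgator", _MSG_SLOW.format("RapidGator")),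
--     ("nitroflare", _MSG_SLOW.format("NitroFlare")),
--     ("fikper", _MSG_SLOW.format("FikPer")),
--     ("1fichier", "Warning: A 1Fichier link was detected. Their download speed isn't extremely slow, but the site has several limitations on their free plan. For example, if you try to access a file a second time, you will have to wait out a very long countdown. You might want to choose a different link if available."),
--     ("qiwi", "Warning: A Qiwi link was detected. They used to be a good filehost, but with their migration to ranoz.gg all qiwi.gg links got invalidated. This may be subject to change in the future, but for now you might want to choose a different link if available."),
--     ("zippyshare", "Warning: A ZippyShare link was detected. ZippyShare got taken down, you should probably choose a different link."),
--     ("pixeldrain", "Warning: A PixelDrain link was detected. Pixeldrain may be good in terms of download speed, but there is a limit on how much you can download. This can be bypassed though, for example with userscripts such as MegaLime0/pixeldrain-bypass-usercript on github."),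
-- ]
--
-- def _match(item):
--     # last matching substring of the table wins within one item
--     found = None
--     low = item.lower()
--     for sub, msg in _TABLE:
--         if sub in low:
--             found = msg
--     return found
--
-- def information_filehost(items):
--     # last-match-wins over items => scan in reverse, first matching item decides
--     for item in reversed(items):
--         msg = _match(item)
--         if msg is not None:
--             return msg
--     return None
-- ===== Notes on version B (the rewrite author's own statement) =====
-- stated objective: simpler
-- what changed: Replaces the 8-way if-chain over an enum plus a second 8-way message chain with a single (substring, message) table; iterates the items in reverse and returns at the first matching item (last-match-wins), eliminating the enum and the second dispatch entirely.
import Mathlib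
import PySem

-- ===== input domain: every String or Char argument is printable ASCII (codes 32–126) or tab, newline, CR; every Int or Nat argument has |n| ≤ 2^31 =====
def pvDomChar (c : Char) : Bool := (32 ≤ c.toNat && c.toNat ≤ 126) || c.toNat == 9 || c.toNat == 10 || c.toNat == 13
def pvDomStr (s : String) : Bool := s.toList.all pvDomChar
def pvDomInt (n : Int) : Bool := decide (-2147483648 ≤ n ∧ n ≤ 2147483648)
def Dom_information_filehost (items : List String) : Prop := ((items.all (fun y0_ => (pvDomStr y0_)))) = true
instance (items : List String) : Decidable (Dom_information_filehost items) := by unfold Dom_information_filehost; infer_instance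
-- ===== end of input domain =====

-- B is simpler: one (substring, message) table, items scanned in reverse with an early
-- return at the first matching item, instead of A's enum state plus two 8-way if-chains.

def msgSlow (name : String) : String :=
  "Warning: A " ++ name ++ " link was detected. Their downloads are extemely slow without their premium plan, you might want to choose a different link if available."
def msg1Fichier : String := "Warning: A 1Fichier link was detected. Their download speed isn't extremely slow, but the site has several limitations on their free plan. For example, if you try to access a file a second time, you will have to wait out a very long countdown. You might want to choose a different link if available."
def msgQiwi : String := "Warning: A Qiwi link was detected. They used to be a good filehost, but with their migration to ranoz.gg all qiwi.gg links got invalidated. This may be subject to change in the future, but for now you might want to choose a different link if available."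
def msgZippy : String := "Warning: A ZippyShare link was detected. ZippyShare got taken down, you should probably choose a different link."
def msgPixel : String := "Warning: A PixelDrain link was detected. Pixeldrain may be good in terms of download speed, but there is a limit on how much you can download. This can be bypassed though, for example with userscripts such as MegaLime0/pixeldrain-bypass-usercript on github."

-- ===== PORT A =====
inductive Host where
  | DDownload | RapidGator | NitroFlare | FikPer | OneFichier | Qiwi | ZippyShare | PixelDrain
deriving DecidableEq, Repr

-- one iteration of A's for-loop: eight sequential if-assignments
def stepA (st : Option Host) (item : String) : Option Host :=
  let st := if PySem.Str.isIn "ddownload" (PySem.Str.lower item) then some Host.DDownload else st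
  let st := if PySem.Str.isIn "rapidgator" (PySem.Str.lower item) then some Host.RapidGator else st
  let st := if PySem.Str.isIn "nitroflare" (PySem.Str.lower item) then some Host.NitroFlare else st
  let st := if PySem.Str.isIn "fikper" (PySem.Str.lower item) then some Host.FikPer else st
  let st := if PySem.Str.isIn "1fichier" (PySem.Str.lower item) then some Host.OneFichier else st
  let st := if PySem.Str.isIn "qiwi" (PySem.Str.lower item) then some Host.Qiwi else st
  let st := if PySem.Str.isIn "zippyshare" (PySem.Str.lower item) then some Host.ZippyShare else st
  let st := if PySem.Str.isIn "pixeldrain" (PySem.Str.lower item) then some Host.PixelDrain else st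
  st

def information_filehost (items : List String) : Option String :=
  let filehost := items.foldl stepA none
  match filehost with
  | some Host.DDownload => some (msgSlow "DDownload")
  | some Host.RapidGator => some (msgSlow "RapidGator")
  | some Host.NitroFlare => some (msgSlow "NitroFlare")
  | some Host.FikPer => some (msgSlow "FikPer")
  | some Host.OneFichier => some msg1Fichier
  | some Host.Qiwi => some msgQiwi
  | some Host.ZippyShare => some msgZippy
  | some Host.PixelDrain => some msgPixel
  | none => none

-- ===== PORT B =====
def pvTable : List (String × String) :=
  [("ddownload", msgSlow "DDownload"), ("rapidgator", msgSlow "RapidGator"),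
   ("nitroflare", msgSlow "NitroFlare"), ("fikper", msgSlow "FikPer"),
   ("1fichier", msg1Fichier), ("qiwi", msgQiwi), ("zippyshare", msgZippy), ("pixeldrain", msgPixel)]

-- last matching substring of the table wins within one item
def matchItem (item : String) : Option String :=
  pvTable.foldl (fun acc p => if PySem.Str.isIn p.1 (PySem.Str.lower item) then some p.2 else acc) none

def information_filehost_alt (items : List String) : Option String :=
  items.reverse.findSome? matchItem

-- ===== PRECONDITION & SPEC =====
def Spec_information_filehost (items : List String) (out : Option String) : Prop := out = information_filehost_alt items
instance (items : List String) (out : Option String) : Decidable (Spec_information_filehost items out) := by unfold Spec_information_filehost; infer_instance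

-- ===== CLAIM (what is proved, stated in full; the proofs are below) =====
def Claim_equal_information_filehost : Prop := ∀ (items : List String), Dom_information_filehost items → Spec_information_filehost items (information_filehost items)

-- ===== LEMMAS AND PROOFS =====

-- enum-valued per-item match, helper for the proof only
def mE (item : String) : Option Host :=
  if PySem.Str.isIn "pixeldrain" (PySem.Str.lower item) then some Host.PixelDrain else
  if PySem.Str.isIn "zippyshare" (PySem.Str.lower item) then some Host.ZippyShare else
  if PySem.Str.isIn "qiwi" (PySem.Str.lower item) then some Host.Qiwi else
  if PySem.Str.isIn "1fichier" (PySem.Str.lower item) then some Host.OneFichier else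
  if PySem.Str.isIn "fikper" (PySem.Str.lower item) then some Host.FikPer else
  if PySem.Str.isIn "nitroflare" (PySem.Str.lower item) then some Host.NitroFlare else
  if PySem.Str.isIn "rapidgator" (PySem.Str.lower item) then some Host.RapidGator else
  if PySem.Str.isIn "ddownload" (PySem.Str.lower item) then some Host.DDownload else none

def msgOf : Host → String
  | Host.DDownload => msgSlow "DDownload"
  | Host.RapidGator => msgSlow "RapidGator"
  | Host.NitroFlare => msgSlow "NitroFlare"
  | Host.FikPer => msgSlow "FikPer"
  | Host.OneFichier => msg1Fichier
  | Host.Qiwi => msgQiwi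
  | Host.ZippyShare => msgZippy
  | Host.PixelDrain => msgPixel

theorem stepA_eq (st : Option Host) (item : String) :
    stepA st item = (match mE item with | some e => some e | none => st) := by
  unfold stepA mE
  split_ifs <;> rfl

theorem matchItem_eq (item : String) : matchItem item = (mE item).map msgOf := by
  unfold matchItem mE pvTable
  simp only [List.foldl]
  split_ifs <;> rfl

theorem foldl_stepA (items : List String) (st : Option Host) :
    items.foldl stepA st =
      (match items.reverse.findSome? mE with | some e => some e | none => st) := by
  induction items generalizing st with
  | nil => rfl
  | cons x xs ih =>
      simp only [List.foldl_cons, List.reverse_cons, List.findSome?_append, ih, stepA_eq]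
      cases h : xs.reverse.findSome? mE <;> simp

theorem findSome?_map (l : List String) :
    l.findSome? matchItem = (l.findSome? mE).map msgOf := by
  induction l with
  | nil => rfl
  | cons x xs ih =>
      simp only [List.findSome?_cons, matchItem_eq]
      cases h : mE x <;> simp [ih]

-- ===== VERDICT (by name: the statement is the Claim_ definition above) =====
theorem information_filehost_spec : Claim_equal_information_filehost := by
  intro items _
  unfold Spec_information_filehost information_filehost information_filehost_alt
  rw [foldl_stepA, findSome?_map]
  cases h : items.reverse.findSome? mE with
  | none => rfl
  | some e => cases e <;> rfl
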